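-- pv_equiv track=rewrite | github.com/zfifteen/geofac | experiments/z5d-informed-gva/wheel_residues.py | count_admissible_in_range
-- ===== SOURCE A (Python) =====
-- WHEEL_210_RESIDUES = [
--     1, 11, 13, 17, 19, 23, 29, 31, 37, 41, 43, 47,
--     53, 59, 61, 67, 71, 73, 79, 83, 89, 97, 101, 103,
--     107, 109, 113, 121, 127, 131, 137, 139, 143, 149, 151,
--     157, 163, 167, 169, 173, 179, 181, 187, 191, 193, 197,
--     199, 209
-- ]
--
-- WHEEL_MODULUS = 210
--
-- WHEEL_SIZE = len(WHEEL_210_RESIDUES)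
--
-- def count_admissible_in_range(start: int, end: int) -> int:
--     """
--     Count admissible integers in [start, end] without generating them.
--
--     More efficient than len(admissible_in_range(start, end)) for large ranges.
--
--     Args:
--         start: Range start (inclusive)
--         end: Range end (inclusive)
--
--     Returns:
--         Number of admissible integers in range
--     """
--     if start > end:
--         return 0
--
--     # Check if start and end are in same cycle
--     start_cycle = start // WHEEL_MODULUS
--     end_cycle = end // WHEEL_MODULUS
--
--     if start_cycle == end_cycle:
--         # Single partial cycle
--         start_residue = start % WHEEL_MODULUS
--         end_residue = end % WHEEL_MODULUS
--         count = sum(1 for r in WHEEL_210_RESIDUES if start_residue <= r <= end_residue)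
--         return count
--
--     # Multiple cycles: count full cycles + partial ends
--     full_cycles = end_cycle - start_cycle - 1
--     count = full_cycles * WHEEL_SIZE
--
--     # Add partial cycle at start (from start_residue to end of cycle)
--     start_residue = start % WHEEL_MODULUS
--     start_in_cycle = sum(1 for r in WHEEL_210_RESIDUES if r >= start_residue)
--     count += start_in_cycle
--
--     # Add partial cycle at end (from start of cycle to end_residue)
--     end_residue = end % WHEEL_MODULUS
--     end_in_cycle = sum(1 for r in WHEEL_210_RESIDUES if r <= end_residue)
--     count += end_in_cycle
--
--     return count
-- ===== SOURCE B (Python) =====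
-- WHEEL_210_RESIDUES = [
--     1, 11, 13, 17, 19, 23, 29, 31, 37, 41, 43, 47,
--     53, 59, 61, 67, 71, 73, 79, 83, 89, 97, 101, 103,
--     107, 109, 113, 121, 127, 131, 137, 139, 143, 149, 151,
--     157, 163, 167, 169, 173, 179, 181, 187, 191, 193, 197,
--     199, 209
-- ]
--
-- WHEEL_MODULUS = 210
--
-- WHEEL_SIZE = len(WHEEL_210_RESIDUES)
--
--
-- def _count_up_to(n: int) -> int:
--     """Number of admissible integers <= n (cumulative count)."""
--     return (n // WHEEL_MODULUS) * WHEEL_SIZE + sum(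
--         1 for r in WHEEL_210_RESIDUES if r <= n % WHEEL_MODULUS
--     )
--
--
-- def count_admissible_in_range(start: int, end: int) -> int:
--     if start > end:
--         return 0
--     return _count_up_to(end) - _count_up_to(start - 1)
-- ===== Notes on version B (the rewrite author's own statement) =====
-- stated objective: simpler
-- what changed: Replaces the same-cycle vs multi-cycle case analysis with a single cumulative-count helper count_up_to(n) applied at both endpoints (count_up_to(end) - count_up_to(start-1)).
import Mathlib
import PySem

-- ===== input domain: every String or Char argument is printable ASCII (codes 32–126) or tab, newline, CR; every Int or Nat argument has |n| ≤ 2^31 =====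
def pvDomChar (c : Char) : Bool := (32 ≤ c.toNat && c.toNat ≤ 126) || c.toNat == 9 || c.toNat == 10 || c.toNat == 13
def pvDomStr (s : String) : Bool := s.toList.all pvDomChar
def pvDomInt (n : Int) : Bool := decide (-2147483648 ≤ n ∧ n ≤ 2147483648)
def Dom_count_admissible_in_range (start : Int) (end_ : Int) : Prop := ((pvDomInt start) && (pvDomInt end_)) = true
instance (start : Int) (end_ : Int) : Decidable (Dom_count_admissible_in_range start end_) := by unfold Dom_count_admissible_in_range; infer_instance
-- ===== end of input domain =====

-- B replaces A's same-cycle/multi-cycle case analysis by one cumulative-count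
-- helper evaluated at both endpoints (simpler; same cost; return value only).

-- ===== PORT A =====
def WHEEL_210_RESIDUES : List Int := [
  1, 11, 13, 17, 19, 23, 29, 31, 37, 41, 43, 47,
  53, 59, 61, 67, 71, 73, 79, 83, 89, 97, 101, 103,
  107, 109, 113, 121, 127, 131, 137, 139, 143, 149, 151,
  157, 163, 167, 169, 173, 179, 181, 187, 191, 193, 197,
  199, 209]

def WHEEL_MODULUS : Int := 210

def WHEEL_SIZE : Int := (WHEEL_210_RESIDUES.length : Int)

def count_admissible_in_range (start : Int) (end_ : Int) : Int :=
  if start > end_ then 0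
  else
    let start_cycle := PySem.Int.floordiv start WHEEL_MODULUS
    let end_cycle := PySem.Int.floordiv end_ WHEEL_MODULUS
    if start_cycle = end_cycle then
      let start_residue := PySem.Int.mod start WHEEL_MODULUS
      let end_residue := PySem.Int.mod end_ WHEEL_MODULUS
      WHEEL_210_RESIDUES.foldl
        (fun c r => if start_residue ≤ r ∧ r ≤ end_residue then c + 1 else c) 0
    else
      let full_cycles := end_cycle - start_cycle - 1
      let count := full_cycles * WHEEL_SIZE
      let start_residue := PySem.Int.mod start WHEEL_MODULUS
      let start_in_cycle := WHEEL_210_RESIDUES.foldl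
        (fun c r => if r ≥ start_residue then c + 1 else c) 0
      let count := count + start_in_cycle
      let end_residue := PySem.Int.mod end_ WHEEL_MODULUS
      let end_in_cycle := WHEEL_210_RESIDUES.foldl
        (fun c r => if r ≤ end_residue then c + 1 else c) 0
      count + end_in_cycle

-- ===== PORT B =====
def countUpTo (n : Int) : Int :=
  PySem.Int.floordiv n WHEEL_MODULUS * WHEEL_SIZE +
    WHEEL_210_RESIDUES.foldl
      (fun c r => if r ≤ PySem.Int.mod n WHEEL_MODULUS then c + 1 else c) 0

def count_admissible_in_range_alt (start : Int) (end_ : Int) : Int :=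
  if start > end_ then 0
  else countUpTo end_ - countUpTo (start - 1)

-- ===== PRECONDITION & SPEC =====
def Spec_count_admissible_in_range (start : Int) (end_ : Int) (out : Int) : Prop := out = count_admissible_in_range_alt start end_
instance (start : Int) (end_ : Int) (out : Int) : Decidable (Spec_count_admissible_in_range start end_ out) := by unfold Spec_count_admissible_in_range; infer_instance

-- ===== CLAIM (what is proved, stated in full; the proofs are below) =====
def Claim_equal_count_admissible_in_range : Prop := ∀ (start : Int) (end_ : Int), Dom_count_admissible_in_range start end_ → Spec_count_admissible_in_range start end_ (count_admissible_in_range start end_)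

-- ===== LEMMAS AND PROOFS =====

-- The counting folds of both ports are countP in disguise (bridge to PySem.List.foldl_count_if).
lemma foldl_count_ite (p : Int → Prop) [DecidablePred p] (l : List Int) (c : Int) :
    l.foldl (fun c r => if p r then c + 1 else c) c
      = c + (l.countP (fun r => decide (p r)) : Int) := by
  simpa using PySem.List.foldl_count_if (fun r => decide (p r)) l c

-- Splitting a closed-interval count at a-1 (valid as soon as a ≤ b + 1).
lemma countP_interval_split (l : List Int) (a b : Int) (h : a ≤ b + 1) :
    l.countP (fun r => decide (a ≤ r ∧ r ≤ b)) + l.countP (fun r => decide (r ≤ a - 1))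
      = l.countP (fun r => decide (r ≤ b)) := by
  induction l with
  | nil => simp
  | cons x xs ih =>
    simp only [List.countP_cons, decide_eq_true_eq]
    split_ifs <;> omega

-- Each element satisfies exactly one of (r ≥ a) and (r ≤ a - 1).
lemma countP_ge_compl (l : List Int) (a : Int) :
    l.countP (fun r => decide (r ≥ a)) + l.countP (fun r => decide (r ≤ a - 1)) = l.length := by
  induction l with
  | nil => simp
  | cons x xs ih =>
    simp only [List.countP_cons, decide_eq_true_eq, List.length_cons]
    split_ifs <;> omega

theorem count_admissible_in_range_eq (start end_ : Int) :
    count_admissible_in_range start end_ = count_admissible_in_range_alt start end_ := by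
  unfold count_admissible_in_range count_admissible_in_range_alt countUpTo
  by_cases hle : start > end_
  · simp [hle]
  · simp only [hle, if_false]
    have h210 : (0:Int) < WHEEL_MODULUS := by decide
    have hs := PySem.Int.floordiv_mul_add_mod start WHEEL_MODULUS
    have he := PySem.Int.floordiv_mul_add_mod end_ WHEEL_MODULUS
    have h1 := PySem.Int.floordiv_mul_add_mod (start - 1) WHEEL_MODULUS
    have hs0 := PySem.Int.mod_nonneg start h210
    have hs1 := PySem.Int.mod_lt start h210
    have he0 := PySem.Int.mod_nonneg end_ h210
    have he1 := PySem.Int.mod_lt end_ h210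
    have hm0 := PySem.Int.mod_nonneg (start - 1) h210
    have hm1 := PySem.Int.mod_lt (start - 1) h210
    set sc := PySem.Int.floordiv start WHEEL_MODULUS with hscdef
    set ec := PySem.Int.floordiv end_ WHEEL_MODULUS with hecdef
    set s1 := PySem.Int.floordiv (start - 1) WHEEL_MODULUS with hs1def
    set a := PySem.Int.mod start WHEEL_MODULUS with hadef
    set b := PySem.Int.mod end_ WHEEL_MODULUS with hbdef
    set a1 := PySem.Int.mod (start - 1) WHEEL_MODULUS with ha1def
    have hM : WHEEL_MODULUS = 210 := rfl
    rw [hM] at hs he h1 hs1 he1 hm1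
    have hrel : (a ≥ 1 ∧ s1 = sc ∧ a1 = a - 1) ∨ (a = 0 ∧ s1 = sc - 1 ∧ a1 = 209) := by omega
    have hWS : WHEEL_SIZE = 48 := by decide
    have hlenN : WHEEL_210_RESIDUES.length = 48 := by decide
    have hneg : WHEEL_210_RESIDUES.countP (fun r => decide (r ≤ (0:Int) - 1)) = 0 := by decide
    have h209 : WHEEL_210_RESIDUES.countP (fun r => decide (r ≤ (209:Int))) = 48 := by decide
    simp only [foldl_count_ite, zero_add, hWS]
    by_cases hc : sc = ec
    · simp only [hc, if_true]
      have hab : a ≤ b := by omega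
      rcases hrel with ⟨ha1ge, hse, ha1⟩ | ⟨ha, hse, ha1⟩
      · have hsplit := countP_interval_split WHEEL_210_RESIDUES a b (by omega)
        rw [hse, ha1]
        omega
      · have hsplit := countP_interval_split WHEEL_210_RESIDUES a b (by omega)
        rw [ha] at hsplit ⊢
        rw [hse, ha1]
        omega
    · simp only [hc, if_false]
      have hcompl := countP_ge_compl WHEEL_210_RESIDUES a
      rcases hrel with ⟨ha1ge, hse, ha1⟩ | ⟨ha, hse, ha1⟩
      · rw [hse, ha1]
        omega
      · rw [ha] at hcompl ⊢
        rw [hse, ha1]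
        omega

-- ===== VERDICT (by name: the statement is the Claim_ definition above) =====
theorem count_admissible_in_range_spec : Claim_equal_count_admissible_in_range := by
  intro start end_ _
  unfold Spec_count_admissible_in_range
  exact count_admissible_in_range_eq start end_
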